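-- pv_equiv track=rewrite | github.com/Neoooou/Spam-Detection | preprocessing.py | clean_msg
-- ===== SOURCE A (Python) =====
-- from string import punctuation
--
-- def clean_msg(msg):
--     tokens = msg.split()
--     table = str.maketrans('','',punctuation)
--     # remove all punctuations
--     tokens = [w.translate(table) for w in tokens]
--     tokens = [wd.lower() for wd in tokens]
--     # remove remaining tokens that are not alphabetic
--     tokens = [word for word in tokens if word.isalpha()]
--     # filter out short words
--     tokens = [w for w in tokens if len(w) > 1]
--     return ' '.join(tokens)
-- ===== SOURCE B (Python) =====
-- from string import punctuation
--
-- def clean_msg(msg):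
--     # character-level state machine: one scan over the raw string (no token
--     # list is ever built); a trailing-space sentinel flushes the last word
--     out = []
--     buf = []
--     ok = True
--     for c in msg + ' ':
--         if c.isspace():
--             if ok and len(buf) > 1:
--                 out.append(''.join(buf))
--             buf = []
--             ok = True
--         elif c in punctuation:
--             pass
--         elif c.isalpha():
--             buf.append(c.lower())
--         else:
--             ok = False
--     return ' '.join(out)
-- ===== Notes on version B (the rewrite author's own statement) =====
-- stated objective: alternative
-- what changed: Replaced A's token pipeline (split, then four list comprehensions over the token list) with a character-level state machine: one scan over the raw string that builds, validates and flushes words in place, never materialising a token list.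
import Mathlib
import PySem

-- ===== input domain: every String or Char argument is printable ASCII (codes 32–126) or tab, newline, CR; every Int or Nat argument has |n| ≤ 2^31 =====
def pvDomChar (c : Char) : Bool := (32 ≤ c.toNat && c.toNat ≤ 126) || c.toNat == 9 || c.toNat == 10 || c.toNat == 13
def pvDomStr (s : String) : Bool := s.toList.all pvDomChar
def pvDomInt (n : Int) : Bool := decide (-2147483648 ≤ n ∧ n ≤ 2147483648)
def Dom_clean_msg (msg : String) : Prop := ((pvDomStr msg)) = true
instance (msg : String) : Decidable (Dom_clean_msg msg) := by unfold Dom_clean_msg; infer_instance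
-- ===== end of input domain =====

-- B replaces A's token pipeline (split + four list comprehensions) with a character-level
-- state machine that scans the raw string once; objective: alternative.

-- string.punctuation; w.translate(table) with table removing punctuation = filter on chars (exact on ASCII)
def pvPunct : List Char := "!\"#$%&'()*+,-./:;<=>?@[\\]^_`{|}~".toList

def pvTranslate (w : String) : String := String.ofList (w.toList.filter (fun c => !(pvPunct.contains c)))

-- ===== PORT A =====
def clean_msg (msg : String) : String :=
  let tokens := PySem.Str.split₀ msg
  let tokens := tokens.map pvTranslate
  let tokens := tokens.map PySem.Str.lower
  let tokens := tokens.filter PySem.Str.strIsalpha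
  let tokens := tokens.filter (fun w => decide (1 < PySem.Str.len w))
  PySem.Str.join " " tokens

-- ===== PORT B =====
-- state = (finished words, current word buffer, current word still all-alphabetic?)
def pvStep (st : List (List Char) × List Char × Bool) (c : Char) :
    List (List Char) × List Char × Bool :=
  if PySem.Chars.isspace c then
    (if st.2.2 && decide (1 < st.2.1.length) then st.1 ++ [st.2.1] else st.1, [], true)
  else if pvPunct.contains c then st
  else if PySem.Chars.isalpha c then (st.1, st.2.1 ++ [PySem.Chars.lowerChar c], st.2.2)
  else (st.1, st.2.1, false)

def clean_msg_alt (msg : String) : String :=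
  String.ofList (PySem.Chars.join [' ']
    ((msg.toList ++ [' ']).foldl pvStep ([], [], true)).1)

-- ===== PRECONDITION & SPEC =====
def Spec_clean_msg (msg : String) (out : String) : Prop := out = clean_msg_alt msg
instance (msg : String) (out : String) : Decidable (Spec_clean_msg msg out) := by unfold Spec_clean_msg; infer_instance

-- ===== CLAIM (what is proved, stated in full; the proofs are below) =====
def Claim_equal_clean_msg : Prop := ∀ (msg : String), Dom_clean_msg msg → Spec_clean_msg msg (clean_msg msg)

-- ===== LEMMAS AND PROOFS =====

-- proof-side abbreviations: A's per-token transform, A's keep-or-drop of one token,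
-- an accumulator-free rendering of split(), and the invariant of B's scan state
def pvFA (w : List Char) : List Char := PySem.Chars.lower (w.filter (fun c => !(pvPunct.contains c)))

def pvProcTok (w : List Char) : List (List Char) :=
  if PySem.Chars.strIsalpha (pvFA w) && decide (1 < (pvFA w).length) then [pvFA w] else []

def pvMySplit : List Char → List Char → List (List Char)
  | [], cur => if cur.isEmpty then [] else [cur]
  | c :: rest, cur =>
      if PySem.Chars.isspace c then
        (if cur.isEmpty then pvMySplit rest [] else cur :: pvMySplit rest [])
      else pvMySplit rest (cur ++ [c])

def pvOk (cur : List Char) : Bool := cur.all (fun c => pvPunct.contains c || PySem.Chars.isalpha c)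

def pvBuf (cur : List Char) : List Char := (cur.filter PySem.Chars.isalpha).map PySem.Chars.lowerChar

-- character facts
theorem pv_toNat_ofNat (n : Nat) (h : n < 55296) : (Char.ofNat n).toNat = n := by
  unfold Char.ofNat
  rw [dif_pos (Or.inl h : Nat.isValidChar n)]
  rfl

theorem pv_isupper_iff (c : Char) : PySem.Chars.isupper c = true ↔ (65 ≤ c.toNat ∧ c.toNat ≤ 90) := by
  simp only [PySem.Chars.isupper, Bool.and_eq_true, decide_eq_true_eq, Char.le_def,
    UInt32.le_iff_toNat_le]
  exact Iff.rfl

theorem pv_islower_iff (c : Char) : PySem.Chars.islower c = true ↔ (97 ≤ c.toNat ∧ c.toNat ≤ 122) := by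
  simp only [PySem.Chars.islower, Bool.and_eq_true, decide_eq_true_eq, Char.le_def,
    UInt32.le_iff_toNat_le]
  exact Iff.rfl

theorem pv_alpha_lower (c : Char) (h : PySem.Chars.isalpha c = true) :
    PySem.Chars.isalpha (PySem.Chars.lowerChar c) = true := by
  simp only [PySem.Chars.isalpha, Bool.or_eq_true] at h ⊢
  rcases h with h | h
  · right
    rw [PySem.Chars.lowerChar, if_pos h]
    obtain ⟨h1, h2⟩ := (pv_isupper_iff c).mp h
    rw [pv_islower_iff, pv_toNat_ofNat (c.toNat + 32) (by omega)]
    omega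
  · have hu : PySem.Chars.isupper c = false := by
      rcases hq : PySem.Chars.isupper c with _ | _
      · rfl
      · obtain ⟨h1, h2⟩ := (pv_isupper_iff c).mp hq
        obtain ⟨h3, h4⟩ := (pv_islower_iff c).mp h
        omega
    rw [PySem.Chars.lowerChar, if_neg (by simp [hu])]
    right; exact h

theorem pv_lower_id (c : Char) (h : PySem.Chars.isalpha c = false) :
    PySem.Chars.lowerChar c = c := by
  have hu : PySem.Chars.isupper c = false := by
    simp only [PySem.Chars.isalpha, Bool.or_eq_false_iff] at h
    exact h.1
  rw [PySem.Chars.lowerChar, if_neg (by simp [hu])]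

theorem pv_punct_ok : pvPunct.all (fun c => !PySem.Chars.isalpha c) = true := by decide

theorem pv_punct_not_alpha (c : Char) (h : pvPunct.contains c = true) :
    PySem.Chars.isalpha c = false := by
  have hmem : c ∈ pvPunct := by simpa using h
  have := List.all_eq_true.mp pv_punct_ok c hmem
  simpa using this

-- split() through the accumulator-free splitter
theorem pv_go_eq : ∀ (cs cur acc : _),
    PySem.Chars.split₀.go cs cur acc = acc.reverse ++ pvMySplit cs cur.reverse := by
  intro cs
  induction cs with
  | nil =>
    intro cur acc
    by_cases h : cur.isEmpty <;> simp [PySem.Chars.split₀.go, pvMySplit, h]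
  | cons c rest ih =>
    intro cur acc
    by_cases hs : PySem.Chars.isspace c
    · by_cases hc : cur.isEmpty
      · have hc' : cur = [] := by simpa [List.isEmpty_iff] using hc
        simp [PySem.Chars.split₀.go, pvMySplit, hs, hc', ih]
      · simp [PySem.Chars.split₀.go, pvMySplit, hs, hc, ih]
    · have h2 : (c :: cur).reverse = cur.reverse ++ [c] := by simp
      simp [PySem.Chars.split₀.go, pvMySplit, hs, ih, h2]

theorem pv_split₀_eq (cs : List Char) : PySem.Chars.split₀ cs = pvMySplit cs [] := by
  simp [PySem.Chars.split₀, pv_go_eq]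

-- the invariant pieces
theorem pv_fa_eq_buf (cur : List Char) (h : pvOk cur = true) : pvFA cur = pvBuf cur := by
  unfold pvFA pvBuf
  simp only [PySem.Chars.lower]
  congr 1
  apply List.filter_congr
  intro c hc
  have hca := List.all_eq_true.mp h c hc
  cases hp : pvPunct.contains c
  · simp only [hp, Bool.false_or] at hca
    simp [hca]
  · simp [pv_punct_not_alpha c hp]

theorem pv_not_alpha (cur : List Char) (h : pvOk cur = false) :
    PySem.Chars.strIsalpha (pvFA cur) = false := by
  unfold pvOk at h
  obtain ⟨c, hc, hcp⟩ := List.all_eq_false.mp h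
  have hcp' : c ∉ pvPunct ∧ PySem.Chars.isalpha c = false := by simpa using hcp
  have hnp := hcp'.1
  have halpha := hcp'.2
  have hmem0 : c ∈ cur.filter (fun x => !(pvPunct.contains x)) :=
    List.mem_filter.mpr ⟨hc, by simp [hnp]⟩
  have hmem : c ∈ pvFA cur := by
    have := List.mem_map_of_mem (f := PySem.Chars.lowerChar) hmem0
    rw [pv_lower_id c halpha] at this
    simpa [pvFA, PySem.Chars.lower] using this
  have hall : (pvFA cur).all PySem.Chars.isalpha = false :=
    List.all_eq_false.mpr ⟨c, hmem, by simp [halpha]⟩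
  simp [PySem.Chars.strIsalpha, hall]

theorem pv_flush (cur : List Char) (out : List (List Char)) :
    (if pvOk cur && decide (1 < (pvBuf cur).length) then out ++ [pvBuf cur] else out)
      = out ++ pvProcTok cur := by
  by_cases hok : pvOk cur = true
  · have hfa : pvFA cur = pvBuf cur := pv_fa_eq_buf cur hok
    unfold pvProcTok
    rw [hfa]
    by_cases hlen : 1 < (pvBuf cur).length
    · have hia : PySem.Chars.strIsalpha (pvBuf cur) = true := by
        have hne : (pvBuf cur).isEmpty = false := by
          cases hq : pvBuf cur
          · simp [hq] at hlen
          · simp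
        have hall : (pvBuf cur).all PySem.Chars.isalpha = true := by
          rw [List.all_eq_true]
          intro x hx
          obtain ⟨y, hy, rfl⟩ := List.mem_map.mp hx
          exact pv_alpha_lower y (List.mem_filter.mp hy).2
        simp [PySem.Chars.strIsalpha, hne, hall]
      simp [hok, hlen, hia]
    · simp [hok, hlen]
  · have hok' : pvOk cur = false := by simpa using hok
    have hia := pv_not_alpha cur hok'
    simp [pvProcTok, hok', hia]

theorem pv_procTok_nil : pvProcTok [] = [] := by decide

-- the main invariant of B's scan: starting from any partially-read word `cur`,
-- scanning the rest plus the sentinel space yields A's kept tokens of mySplit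
theorem pv_main : ∀ (cs cur : List Char) (out : List (List Char)),
    (cs ++ [' ']).foldl pvStep (out, pvBuf cur, pvOk cur)
      = (out ++ (pvMySplit cs cur).flatMap pvProcTok, [], true) := by
  intro cs
  induction cs with
  | nil =>
    intro cur out
    simp only [List.nil_append, List.foldl_cons, List.foldl_nil]
    unfold pvStep
    rw [if_pos (by decide : PySem.Chars.isspace ' ' = true)]
    simp only []
    rw [pv_flush]
    by_cases hc : cur.isEmpty
    · have hc' : cur = [] := by simpa [List.isEmpty_iff] using hc
      simp [pvMySplit, hc', pv_procTok_nil]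
    · simp [pvMySplit, hc]
  | cons c rest ih =>
    intro cur out
    simp only [List.cons_append, List.foldl_cons]
    by_cases hs : PySem.Chars.isspace c = true
    · have hstep : pvStep (out, pvBuf cur, pvOk cur) c = (out ++ pvProcTok cur, [], true) := by
        unfold pvStep
        rw [if_pos hs]
        simp only []
        rw [pv_flush]
      rw [hstep]
      have h := ih [] (out ++ pvProcTok cur)
      simp only [pvBuf, pvOk, List.filter_nil, List.map_nil, List.all_nil] at h
      rw [h]
      by_cases hc : cur.isEmpty
      · have hc' : cur = [] := by simpa [List.isEmpty_iff] using hc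
        simp [pvMySplit, hs, hc', pv_procTok_nil]
      · simp [pvMySplit, hs, hc]
    · have hs' : PySem.Chars.isspace c = false := by simpa using hs
      by_cases hp : pvPunct.contains c = true
      · have hca := pv_punct_not_alpha c hp
        have hbuf : pvBuf (cur ++ [c]) = pvBuf cur := by
          simp [pvBuf, List.filter_append, hca]
        have hok : pvOk (cur ++ [c]) = pvOk cur := by
          unfold pvOk
          rw [List.all_append]
          simp only [List.all_cons, List.all_nil, hp, Bool.true_or, Bool.and_true]
        have hstep : pvStep (out, pvBuf cur, pvOk cur) c
            = (out, pvBuf (cur ++ [c]), pvOk (cur ++ [c])) := by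
          unfold pvStep
          rw [if_neg (by simp [hs']), if_pos hp, hbuf, hok]
        rw [hstep, ih (cur ++ [c]) out]
        simp [pvMySplit, hs']
      · have hp' : pvPunct.contains c = false := by simpa using hp
        by_cases ha : PySem.Chars.isalpha c = true
        · have hbuf : pvBuf (cur ++ [c]) = pvBuf cur ++ [PySem.Chars.lowerChar c] := by
            simp [pvBuf, List.filter_append, ha]
          have hnp : c ∉ pvPunct := by simpa using hp'
          have hok : pvOk (cur ++ [c]) = pvOk cur := by
            unfold pvOk
            rw [List.all_append]
            simp only [List.all_cons, List.all_nil, ha, Bool.or_true, Bool.and_true]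
          have hstep : pvStep (out, pvBuf cur, pvOk cur) c
              = (out, pvBuf (cur ++ [c]), pvOk (cur ++ [c])) := by
            unfold pvStep
            rw [if_neg (by simp [hs']), if_neg (by simp [hnp]), if_pos ha, hbuf, hok]
          rw [hstep, ih (cur ++ [c]) out]
          simp [pvMySplit, hs']
        · have ha' : PySem.Chars.isalpha c = false := by simpa using ha
          have hbuf : pvBuf (cur ++ [c]) = pvBuf cur := by
            simp [pvBuf, List.filter_append, ha']
          have hnp : c ∉ pvPunct := by simpa using hp'
          have hok : pvOk (cur ++ [c]) = false := by
            unfold pvOk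
            rw [List.all_append]
            simp only [List.all_cons, List.all_nil, hp', ha', Bool.or_false, Bool.and_false,
              Bool.and_true]
          have hstep : pvStep (out, pvBuf cur, pvOk cur) c
              = (out, pvBuf (cur ++ [c]), pvOk (cur ++ [c])) := by
            unfold pvStep
            rw [if_neg (by simp [hs']), if_neg (by simp [hnp]), if_neg (by simp [ha']), hbuf, hok]
          rw [hstep, ih (cur ++ [c]) out]
          simp [pvMySplit, hs']

-- A's four comprehensions over a token list, pushed to List Char and fused into flatMap pvProcTok
theorem pv_pipeline : ∀ (toks : List String),
    ((((toks.map pvTranslate).map PySem.Str.lower).filter PySem.Str.strIsalpha).filter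
        (fun w => decide (1 < PySem.Str.len w))).map String.toList
      = (toks.map String.toList).flatMap pvProcTok := by
  intro toks
  induction toks with
  | nil => simp
  | cons t ts ih =>
    have ht : (pvTranslate t).toList = t.toList.filter (fun c => !(pvPunct.contains c)) := by
      simp [pvTranslate]
    have hw : (PySem.Str.lower (pvTranslate t)).toList = pvFA t.toList := by
      simp only [PySem.Str.lower, String.toList_ofList, ht]
      rfl
    have hia : PySem.Str.strIsalpha (PySem.Str.lower (pvTranslate t))
        = PySem.Chars.strIsalpha (pvFA t.toList) := by
      simp only [PySem.Str.strIsalpha, hw]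
    have hlen : PySem.Str.len (PySem.Str.lower (pvTranslate t))
        = ((pvFA t.toList).length : Int) := by
      simp only [PySem.Str.len, hw]
    simp only [List.map_cons, List.flatMap_cons, List.filter_cons, hia]
    by_cases h1 : PySem.Chars.strIsalpha (pvFA t.toList) = true
    · rw [if_pos h1]
      simp only [List.filter_cons, hlen]
      by_cases h2 : 1 < (pvFA t.toList).length
      · have h2i : decide (1 < ((pvFA t.toList).length : Int)) = true := by
          simp only [decide_eq_true_eq]
          exact_mod_cast h2
        rw [if_pos h2i]
        have hk : (PySem.Chars.strIsalpha (pvFA t.toList)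
            && decide (1 < (pvFA t.toList).length)) = true := by
          simp [h1, h2]
        simp only [List.map_cons, hw]
        rw [ih]
        simp [pvProcTok, hk]
      · have h2i : decide (1 < ((pvFA t.toList).length : Int)) = false := by
          simp only [decide_eq_false_iff_not]
          omega
        rw [if_neg (by rw [h2i]; simp)]
        have hk : (PySem.Chars.strIsalpha (pvFA t.toList)
            && decide (1 < (pvFA t.toList).length)) = false := by
          simp [h2]
        rw [ih]
        simp [pvProcTok, hk]
    · have h1' : PySem.Chars.strIsalpha (pvFA t.toList) = false := by simpa using h1
      rw [if_neg (by simp [h1'])]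
      have hk : (PySem.Chars.strIsalpha (pvFA t.toList)
          && decide (1 < (pvFA t.toList).length)) = false := by
        simp [h1']
      rw [ih]
      simp [pvProcTok, hk]

theorem pv_eq (msg : String) : clean_msg msg = clean_msg_alt msg := by
  have hmain : (msg.toList ++ [' ']).foldl pvStep ([], [], true)
      = ((pvMySplit msg.toList []).flatMap pvProcTok, [], true) := by
    have h := pv_main msg.toList [] []
    simpa [pvBuf, pvOk] using h
  have hp := pv_pipeline (PySem.Str.split₀ msg)
  rw [PySem.Str.split₀_map_toList] at hp
  simp only [clean_msg, clean_msg_alt, hmain, PySem.Str.join]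
  rw [hp, pv_split₀_eq]
  rfl

-- ===== VERDICT (by name: the statement is the Claim_ definition above) =====
theorem clean_msg_spec : Claim_equal_clean_msg := by
  intro msg _
  exact pv_eq msg
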